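-- pv_equiv track=rewrite | github.com/benmor20/AdventOfCode | year2024/puzzles/day21.py | num_moves
-- ===== SOURCE A (Python) =====
-- CONTROLLER = {
--     'A': 0 + 2j,
--     '^': 0 + 1j,
--     '<': 1 + 0j,
--     'v': 1 + 1j,
--     '>': 1 + 2j,
-- }
--
-- DIRECTIONS = {
--     1: 'v',
--     -1: '^',
--     1j: '>',
--     -1j: '<'
-- }
--
-- PATH_MEMO = {}
--
-- def get_path_from_code(code, positions):
--     if code in PATH_MEMO:
--         return PATH_MEMO[code]
--     current_pos = 'A'
--     path = ''
--     for next_pos in code: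
--         diff = positions[next_pos] - positions[current_pos]
--         lr = DIRECTIONS[1j if diff.imag > 0 else -1j] * abs(int(diff.imag))
--         ud = DIRECTIONS[1 if diff.real > 0 else -1] * abs(int(diff.real))
--         if current_pos in '0A^' and next_pos in '147<':
--             path += f'{ud}{lr}A'
--         elif current_pos in '147<' and next_pos in '0A^':
--             path += f'{lr}{ud}A'
--         else:
--             # Evidently the order of this sort is very important
--             # <v>^ works for P1 but not P2
--             path += ''.join(sorted(f'{lr}{ud}', key=lambda c: '<v^>'.index(c))) + 'A'
--         current_pos = next_pos
--     PATH_MEMO[code] = path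
--     return path
--
-- NUM_MEMO = {}
--
-- def num_moves(code, repeats):
--     if (code, repeats) in NUM_MEMO:
--         return NUM_MEMO[(code, repeats)]
--     if repeats == 0:
--         NUM_MEMO[(code, repeats)] = len(code)
--         return len(code)
--     path = get_path_from_code(code, CONTROLLER)
--     ans = sum(num_moves(sec + 'A', repeats - 1) for sec in path.split('A')[:-1])
--     NUM_MEMO[(code, repeats)] = ans
--     return ans
-- ===== SOURCE B (Python) =====
-- CONTROLLER_POS = {'A': (0, 2), '^': (0, 1), '<': (1, 0), 'v': (1, 1), '>': (1, 2)}
--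
-- def _move(p, n):
--     # move string pressed on the controller to go from key p to key n and press it
--     r0, c0 = CONTROLLER_POS[p]
--     r1, c1 = CONTROLLER_POS[n]
--     lr = ('>' if c1 > c0 else '<') * abs(c1 - c0)
--     ud = ('v' if r1 > r0 else '^') * abs(r1 - r0)
--     if p in 'A^' and n == '<':
--         s = ud + lr
--     elif p == '<' and n in 'A^':
--         s = lr + ud
--     else:
--         s = ''.join(sorted(lr + ud, key='<v^>'.index))
--     return s + 'A'
--
-- def _add_pairs(d, s, c):
--     # add c to the count of every consecutive key pair typed, starting from 'A'
--     prev = 'A'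
--     for ch in s:
--         d[(prev, ch)] = d.get((prev, ch), 0) + c
--         prev = ch
--     return d
--
-- def num_moves(code, repeats):
--     # transition-multiset DP: count key transitions, expand the multiset level by level
--     counts = _add_pairs({}, code, 1)
--     for _ in range(repeats):
--         new = {}
--         for (p, n), c in counts.items():
--             _add_pairs(new, _move(p, n), c)
--         counts = new
--     return sum(counts.values())
-- ===== Notes on version B (the rewrite author's own statement) =====
-- stated objective: alternative
-- what changed: Replaces A's top-down memoised recursion over whole 'A'-terminated segments (built by get_path_from_code and re-split on 'A') with a transition-multiset dynamic program: B counts consecutive key-pair transitions in a dict, expands that multiset level by level using a per-pair move helper, and returns the final total count; it never builds or splits whole path strings and has no recursion or memo table.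
import Mathlib
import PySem

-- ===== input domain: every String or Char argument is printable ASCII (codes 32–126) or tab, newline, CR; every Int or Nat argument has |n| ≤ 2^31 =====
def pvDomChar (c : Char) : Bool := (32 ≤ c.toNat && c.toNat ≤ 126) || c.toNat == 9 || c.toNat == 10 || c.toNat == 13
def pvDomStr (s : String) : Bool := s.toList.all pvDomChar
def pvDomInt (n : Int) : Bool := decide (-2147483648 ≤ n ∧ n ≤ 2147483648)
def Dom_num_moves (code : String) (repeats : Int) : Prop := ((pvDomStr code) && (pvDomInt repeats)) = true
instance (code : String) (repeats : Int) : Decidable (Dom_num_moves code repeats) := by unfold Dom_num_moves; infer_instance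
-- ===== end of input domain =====

-- B replaces A's top-down memoised recursion over whole path segments by a
-- transition-multiset dynamic program over consecutive key pairs; same values.

-- ===== PORT A =====

-- CONTROLLER: complex positions ported as (real, imag) Int pairs
def pvController : PySem.Dict Char (Int × Int) :=
  PySem.Dict.ofList [('A', (0, 2)), ('^', (0, 1)), ('<', (1, 0)), ('v', (1, 1)), ('>', (1, 2))]

-- one iteration of get_path_from_code's loop; state = (current_pos, path).
-- positions.getD … (0,0) is exact on Pre_: every char looked up is a CONTROLLER key
-- (a KeyError input is outside Pre_); DIRECTIONS[…] * abs(int(…)) is the replicate.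
def pvPathStep (positions : PySem.Dict Char (Int × Int)) (st : Char × List Char)
    (nextPos : Char) : Char × List Char :=
  let currentPos := st.1
  let pn := positions.getD nextPos (0, 0)
  let pc := positions.getD currentPos (0, 0)
  let diff : Int × Int := (pn.1 - pc.1, pn.2 - pc.2)
  let lr := List.replicate diff.2.natAbs (if diff.2 > 0 then '>' else '<')
  let ud := List.replicate diff.1.natAbs (if diff.1 > 0 then 'v' else '^')
  let seg :=
    if (['0', 'A', '^'].contains currentPos ∧ ['1', '4', '7', '<'].contains nextPos) then
      ud ++ lr ++ ['A']
    else if (['1', '4', '7', '<'].contains currentPos ∧ ['0', 'A', '^'].contains nextPos) then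
      lr ++ ud ++ ['A']
    else
      -- '<v^>'.index(c): every sorted char is one of '<v^>' so the .getD 0 default never fires
      PySem.List.sorted (lr ++ ud) (fun c => (PySem.List.index? ['<', 'v', '^', '>'] c).getD 0)
        ++ ['A']
  (nextPos, st.2 ++ seg)

-- get_path_from_code (the PATH_MEMO cache does not change the value and is dropped)
def pvGetPathFromCode (code : List Char) (positions : PySem.Dict Char (Int × Int)) : List Char :=
  (code.foldl (pvPathStep positions) ('A', [])).2

-- num_moves with its NUM_MEMO cache threaded through the recursion (Python's global
-- dict starts empty on the first call; entries only cache already-computed results).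
-- The generator sum 'sum(num_moves(sec + 'A', repeats - 1) …)' is the left-to-right
-- accumulation pvNumAList, exactly as Python evaluates it.
mutual
def pvNumA (code : List Char) (n : Nat) (memo : PySem.Dict (List Char × Nat) Int) :
    Int × PySem.Dict (List Char × Nat) Int :=
  match memo.get? (code, n) with
  | some v => (v, memo)
  | none =>
    match n with
    | 0 => ((code.length : Int), memo.insert (code, 0) (code.length : Int))
    | m + 1 =>
      let secs := PySem.List.slice
        (PySem.Chars.splitOn (pvGetPathFromCode code pvController) ['A']) none (some (-1))
      let r := pvNumAList secs m 0 memo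
      (r.1, r.2.insert (code, m + 1) r.1)
  termination_by (n, 0)

def pvNumAList (secs : List (List Char)) (m : Nat) (s : Int)
    (memo : PySem.Dict (List Char × Nat) Int) : Int × PySem.Dict (List Char × Nat) Int :=
  match secs with
  | [] => (s, memo)
  | sec :: rest =>
    let r := pvNumA (sec ++ ['A']) m memo
    pvNumAList rest m (s + r.1) r.2
  termination_by (m, secs.length + 1)
end

-- repeats < 0 makes Python recurse without bound (outside Pre_); .toNat is exact on Pre_
def num_moves (code : String) (repeats : Int) : Int :=
  (pvNumA code.toList repeats.toNat PySem.Dict.empty).1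

-- ===== PORT B =====

-- CONTROLLER_POS, B's (row, col) grid of the five controller keys
def pvPosB : PySem.Dict Char (Int × Int) :=
  PySem.Dict.ofList [('A', (0, 2)), ('^', (0, 1)), ('<', (1, 0)), ('v', (1, 1)), ('>', (1, 2))]

-- _move(p, n): the controller move string for one key transition (getD default
-- (0,0) never fires inside Pre_: both chars are controller keys there)
def pvMove (p n : Char) : List Char :=
  let a := pvPosB.getD p (0, 0)
  let b := pvPosB.getD n (0, 0)
  let lr := List.replicate (b.2 - a.2).natAbs (if b.2 > a.2 then '>' else '<')
  let ud := List.replicate (b.1 - a.1).natAbs (if b.1 > a.1 then 'v' else '^')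
  let s :=
    if (p = 'A' ∨ p = '^') ∧ n = '<' then ud ++ lr
    else if p = '<' ∧ (n = 'A' ∨ n = '^') then lr ++ ud
    else PySem.List.sorted (lr ++ ud) (fun c => (PySem.List.index? ['<', 'v', '^', '>'] c).getD 0)
  s ++ ['A']

-- _add_pairs(d, s, c): bump the count of every consecutive pair of 'A'+s by c
def pvAddPairs (d : PySem.Dict (Char × Char) Int) (s : List Char) (c : Int) :
    PySem.Dict (Char × Char) Int :=
  (s.foldl (fun st ch => (st.1.insert (st.2, ch) (st.1.getD (st.2, ch) 0 + c), ch)) (d, 'A')).1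

-- one pass of B's level loop: expand every counted transition one level down
def pvStepB (counts : PySem.Dict (Char × Char) Int) : PySem.Dict (Char × Char) Int :=
  counts.items.foldl (fun new q => pvAddPairs new (pvMove q.1.1 q.1.2) q.2) PySem.Dict.empty

def num_moves_alt (code : String) (repeats : Int) : Int :=
  let counts := pvAddPairs PySem.Dict.empty code.toList 1
  let final := (PySem.List.pyRange 0 repeats).foldl (fun c _ => pvStepB c) counts
  final.values.sum

-- ===== PRECONDITION & SPEC =====
-- Pre_ excludes exactly the inputs where Python A raises: repeats < 0 with a nonempty
-- code (unbounded recursion) and repeats > 0 with a character outside CONTROLLER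
-- (KeyError); on an empty code A returns for every repeats (the path is empty).
def Pre_num_moves (code : String) (repeats : Int) : Prop :=
  code = "" ∨
    (0 ≤ repeats ∧
      (repeats = 0 ∨ (code.toList.all (fun c => (['A', '^', '<', 'v', '>'] : List Char).contains c)) = true))
instance (code : String) (repeats : Int) : Decidable (Pre_num_moves code repeats) := by
  unfold Pre_num_moves; infer_instance

def pvWitness_num_moves : String × Int := ("<A", 2)

def Spec_num_moves (code : String) (repeats : Int) (out : Int) : Prop := out = num_moves_alt code repeats
instance (code : String) (repeats : Int) (out : Int) : Decidable (Spec_num_moves code repeats out) := by unfold Spec_num_moves; infer_instance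

-- ===== CLAIM (what is proved, stated in full; the proofs are below) =====
def Claim_equal_num_moves : Prop := ∀ (code : String) (repeats : Int), Dom_num_moves code repeats → Pre_num_moves code repeats → Spec_num_moves code repeats (num_moves code repeats)

-- ===== LEMMAS AND PROOFS =====

-- the five controller keys
def pvKeys : List Char := ['A', '^', '<', 'v', '>']

-- cache-free restatement of A's recursion, the reference value of the A side
def pvNumMovesA : List Char → Nat → Int
  | code, 0 => (code.length : Int)
  | code, n + 1 =>
    ((PySem.List.slice
        (PySem.Chars.splitOn (pvGetPathFromCode code pvController) ['A']) none (some (-1))).map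
      (fun sec => pvNumMovesA (sec ++ ['A']) n)).sum

-- B's reference value of one transition after r expansion levels
def pvPairCost : Nat → Char → Char → Int
  | 0, _, _ => 1
  | r + 1, p, n =>
    ((('A' :: pvMove p n).zip (pvMove p n)).map (fun q => pvPairCost r q.1 q.2)).sum

-- ---- A-side: memo soundness (cache never changes the value) ----

def pvInv (memo : PySem.Dict (List Char × Nat) Int) : Prop :=
  ∀ c j v, memo.get? (c, j) = some v → v = pvNumMovesA c j

theorem pvInv_empty : pvInv PySem.Dict.empty := by
  intro c j v h
  simp [PySem.Dict.empty, PySem.Dict.get?] at h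

theorem pvInv_insert (memo : PySem.Dict (List Char × Nat) Int) (c0 : List Char) (j0 : Nat)
    {w : Int} (hm : pvInv memo) (hv : pvNumMovesA c0 j0 = w) :
    pvInv (memo.insert (c0, j0) w) := by
  intro c j v h
  rw [PySem.Dict.get?_insert] at h
  by_cases he : (c, j) = (c0, j0)
  · have hc : c = c0 := congrArg Prod.fst he
    have hj : j = j0 := congrArg Prod.snd he
    subst hc; subst hj
    rw [if_pos rfl] at h
    rw [← Option.some.inj h, ← hv]
  · rw [if_neg he] at h
    exact hm c j v h

theorem pvNumA_correct : ∀ (n : Nat),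
    (∀ (code : List Char) (memo : PySem.Dict (List Char × Nat) Int), pvInv memo →
      (pvNumA code n memo).1 = pvNumMovesA code n ∧ pvInv (pvNumA code n memo).2) := by
  intro n
  induction n with
  | zero =>
    intro code memo hm
    rw [pvNumA]
    cases hg : memo.get? (code, 0) with
    | some v => exact ⟨hm code 0 v hg, hm⟩
    | none =>
      refine ⟨rfl, ?_⟩
      exact pvInv_insert memo code 0 hm rfl
  | succ m ih =>
    intro code memo hm
    have hlist : ∀ (secs : List (List Char)) (s : Int)
        (memo : PySem.Dict (List Char × Nat) Int), pvInv memo →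
        (pvNumAList secs m s memo).1
            = s + (secs.map (fun sec => pvNumMovesA (sec ++ ['A']) m)).sum
          ∧ pvInv (pvNumAList secs m s memo).2 := by
      intro secs
      induction secs with
      | nil => intro s memo hm; rw [pvNumAList]; exact ⟨by simp, hm⟩
      | cons sec rest ihl =>
        intro s memo hm
        rw [pvNumAList]
        obtain ⟨h1, h2⟩ := ih (sec ++ ['A']) memo hm
        obtain ⟨h3, h4⟩ := ihl (s + (pvNumA (sec ++ ['A']) m memo).1) _ h2
        refine ⟨?_, h4⟩
        rw [h3, h1]
        simp only [List.map_cons, List.sum_cons]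
        ring
    rw [pvNumA]
    cases hg : memo.get? (code, m + 1) with
    | some v => exact ⟨hm code (m + 1) v hg, hm⟩
    | none =>
      obtain ⟨h1, h2⟩ := hlist
        (PySem.List.slice
          (PySem.Chars.splitOn (pvGetPathFromCode code pvController) ['A']) none (some (-1)))
        0 memo hm
      have hval : (pvNumAList
          (PySem.List.slice
            (PySem.Chars.splitOn (pvGetPathFromCode code pvController) ['A']) none (some (-1)))
          m 0 memo).1 = pvNumMovesA code (m + 1) := by
        rw [h1]
        show _ = pvNumMovesA code (m + 1)
        rw [pvNumMovesA]
        simp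
      exact ⟨hval, pvInv_insert _ code (m + 1) h2 hval.symm⟩

-- ---- the 25-case kernel facts linking A's per-step segment to B's pvMove ----

-- A's segment for one transition
def pvSegA (p n : Char) : List Char := (pvPathStep pvController (p, []) n).2

set_option maxRecDepth 10000 in
theorem pv_move_check :
    (pvKeys.all (fun p => pvKeys.all (fun n =>
      pvSegA p n == pvMove p n &&
      (pvMove p n).dropLast ++ ['A'] == pvMove p n &&
      !((pvMove p n).dropLast.contains 'A') &&
      (pvMove p n).all (fun c => pvKeys.contains c)))) = true := by decide

theorem pv_move_facts : ∀ p, p ∈ pvKeys → ∀ n, n ∈ pvKeys →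
    pvSegA p n = pvMove p n ∧ (pvMove p n).dropLast ++ ['A'] = pvMove p n ∧
      'A' ∉ (pvMove p n).dropLast ∧ ∀ c ∈ pvMove p n, c ∈ pvKeys := by
  intro p hp n hn
  have h := pv_move_check
  rw [List.all_eq_true] at h
  have h := h p hp
  rw [List.all_eq_true] at h
  have h := h n hn
  simp only [Bool.and_eq_true, beq_iff_eq, Bool.not_eq_true', List.contains_eq_mem,
    List.all_eq_true, decide_eq_false_iff_not] at h
  obtain ⟨⟨⟨h1, h2⟩, h3⟩, h4⟩ := h
  exact ⟨h1, h2, h3, fun c hc => by have := h4 c hc; simpa using this⟩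

-- ---- A's path is the concatenation of per-transition segments ----

theorem pv_path_fold (code : List Char) : ∀ (p : Char) (acc : List Char),
    (code.foldl (pvPathStep pvController) (p, acc)).2
      = acc ++ ((p :: code).zip code).flatMap (fun q => pvSegA q.1 q.2) := by
  induction code with
  | nil => intro p acc; simp
  | cons c rest ih =>
    intro p acc
    have hstep : pvPathStep pvController (p, acc) c = (c, acc ++ pvSegA p c) := by
      simp [pvPathStep, pvSegA]
    rw [List.foldl_cons, hstep, ih c (acc ++ pvSegA p c)]
    simp [List.zip_cons_cons]

-- ---- characterising PySem.Chars.splitOn on 'A'-terminated blocks ----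

-- simple structural model of str.split('A')
def pvSplitA : List Char → List Char → List (List Char)
  | [], cur => [cur.reverse]
  | c :: rest, cur => if c = 'A' then cur.reverse :: pvSplitA rest [] else pvSplitA rest (c :: cur)

theorem pv_splitOn_go (fuel : Nat) : ∀ (l cur : List Char) (acc : List (List Char)),
    l.length < fuel →
    PySem.Chars.splitOn.go ['A'] fuel l cur acc = acc.reverse ++ pvSplitA l cur := by
  induction fuel with
  | zero => intro l cur acc h; omega
  | succ f ih =>
    intro l cur acc h
    cases l with
    | nil => simp [PySem.Chars.splitOn.go, pvSplitA]
    | cons c rest =>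
      by_cases hc : c = 'A'
      · subst hc
        rw [PySem.Chars.splitOn.go]
        simp only [List.isPrefixOf, beq_self_eq_true, Bool.true_and, if_true,
          List.length_cons, List.drop_succ_cons, List.length_nil, List.drop_zero]
        rw [ih rest [] _ (by simp at h ⊢; omega)]
        simp [pvSplitA]
      · rw [PySem.Chars.splitOn.go]
        have hpre : (['A'].isPrefixOf (c :: rest)) = false := by
          simp [List.isPrefixOf]
          exact fun he => hc he.symm
        simp only [hpre, if_neg, Bool.false_eq_true, not_false_eq_true]
        rw [ih rest (c :: cur) acc (by simp at h ⊢; omega)]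
        simp [pvSplitA, hc]

theorem pv_splitOn_eq (l : List Char) :
    PySem.Chars.splitOn l ['A'] = pvSplitA l [] := by
  show PySem.Chars.splitOn.go ['A'] (l.length + 1) l [] [] = _
  rw [pv_splitOn_go (l.length + 1) l [] [] (by omega)]
  simp

theorem pv_splitA_block (b : List Char) (hb : 'A' ∉ b) :
    ∀ (rest cur : List Char),
      pvSplitA (b ++ 'A' :: rest) cur = (cur.reverse ++ b) :: pvSplitA rest [] := by
  induction b with
  | nil => intro rest cur; simp [pvSplitA]
  | cons c t ih =>
    intro rest cur
    have hc : c ≠ 'A' := by intro he; exact hb (by simp [he])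
    have ht : 'A' ∉ t := fun h => hb (by simp [h])
    simp only [List.cons_append, pvSplitA, if_neg hc]
    rw [ih ht rest (c :: cur)]
    simp

theorem pv_splitA_blocks : ∀ (qs : List (Char × Char)),
    (∀ q ∈ qs, (pvMove q.1 q.2).dropLast ++ ['A'] = pvMove q.1 q.2 ∧
      'A' ∉ (pvMove q.1 q.2).dropLast) →
    pvSplitA (qs.flatMap (fun q => pvMove q.1 q.2)) []
      = qs.map (fun q => (pvMove q.1 q.2).dropLast) ++ [[]] := by
  intro qs
  induction qs with
  | nil => intro _; simp [pvSplitA]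
  | cons q t ih =>
    intro h
    obtain ⟨hshape, hnoA⟩ := h q (List.mem_cons_self)
    rw [List.flatMap_cons, ← hshape]
    have : (pvMove q.1 q.2).dropLast ++ ['A'] ++ t.flatMap (fun q => pvMove q.1 q.2)
        = (pvMove q.1 q.2).dropLast ++ ('A' :: t.flatMap (fun q => pvMove q.1 q.2)) := by
      simp
    rw [this, pv_splitA_block _ hnoA]
    rw [ih (fun q hq => h q (List.mem_cons_of_mem _ hq))]
    simp

-- members of the transition list of an all-keys code are key pairs
theorem pv_zip_keys (code : List Char) (hc : ∀ c ∈ code, c ∈ pvKeys) :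
    ∀ q ∈ ('A' :: code).zip code, q.1 ∈ pvKeys ∧ q.2 ∈ pvKeys := by
  intro q hq
  obtain ⟨h1, h2⟩ := List.of_mem_zip hq
  refine ⟨?_, hc q.2 h2⟩
  rcases List.mem_cons.mp h1 with h | h
  · rw [h]; simp [pvKeys]
  · exact hc q.1 h

-- ---- the bridge: A's recursion equals the sum of per-transition costs ----

theorem pv_bridge_zero (code : List Char) :
    pvNumMovesA code 0
      = ((('A' :: code).zip code).map (fun q => pvPairCost 0 q.1 q.2)).sum := by
  rw [pvNumMovesA]
  have hlen : (('A' :: code).zip code).length = code.length := by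
    simp [List.length_zip]
  calc (code.length : Int)
      = ((('A' :: code).zip code).map (fun _ => (1 : Int))).sum := by
        rw [List.map_const']
        rw [List.sum_replicate, hlen]
        simp
    _ = _ := by
        apply congrArg
        exact List.map_congr_left (fun q _ => rfl)

theorem pv_bridgeA : ∀ (r : Nat) (code : List Char), (∀ c ∈ code, c ∈ pvKeys) →
    pvNumMovesA code r
      = ((('A' :: code).zip code).map (fun q => pvPairCost r q.1 q.2)).sum := by
  intro r
  induction r with
  | zero =>
    intro code _
    exact pv_bridge_zero code
  | succ r ih =>
    intro code hc
    have hq := pv_zip_keys code hc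
    rw [pvNumMovesA]
    -- the path is the concatenation of pvMove blocks
    have hpath : pvGetPathFromCode code pvController
        = (('A' :: code).zip code).flatMap (fun q => pvMove q.1 q.2) := by
      unfold pvGetPathFromCode
      rw [pv_path_fold code 'A' []]
      simp only [List.nil_append]
      apply List.flatMap_congr
      intro q hqm
      obtain ⟨k1, k2⟩ := hq q hqm
      exact (pv_move_facts q.1 k1 q.2 k2).1
    have hfacts : ∀ q ∈ ('A' :: code).zip code,
        (pvMove q.1 q.2).dropLast ++ ['A'] = pvMove q.1 q.2 ∧
          'A' ∉ (pvMove q.1 q.2).dropLast := by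
      intro q hqm
      obtain ⟨k1, k2⟩ := hq q hqm
      obtain ⟨_, h2, h3, _⟩ := pv_move_facts q.1 k1 q.2 k2
      exact ⟨h2, h3⟩
    rw [hpath, pv_splitOn_eq, pv_splitA_blocks _ hfacts, PySem.List.slice_to_neg_one]
    rw [List.dropLast_concat, List.map_map]
    apply congrArg
    apply List.map_congr_left
    intro q hqm
    obtain ⟨k1, k2⟩ := hq q hqm
    obtain ⟨_, hshape, _, hkeys⟩ := pv_move_facts q.1 k1 q.2 k2
    show pvNumMovesA ((pvMove q.1 q.2).dropLast ++ ['A']) r = pvPairCost (r + 1) q.1 q.2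
    rw [hshape, ih (pvMove q.1 q.2) hkeys]
    rfl

-- ---- B side ----

-- the weighted sum B maintains over the transition dict
def pvWp (r : Nat) (d : PySem.Dict (Char × Char) Int) : Int :=
  (d.items.map (fun q => pvPairCost r q.1.1 q.1.2 * q.2)).sum

-- bumping one key by c shifts the weighted item sum by f k * c (keys distinct)
theorem pv_sum_insert_bump {κ : Type} [BEq κ] [LawfulBEq κ] (f : κ → Int) (c : Int) :
    ∀ (l : List (κ × Int)) (k : κ), (l.map Prod.fst).Nodup →
      (((PySem.Dict.mk l).insert k ((PySem.Dict.mk l).getD k 0 + c)).items.map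
          (fun p => f p.1 * p.2)).sum
        = (l.map (fun p => f p.1 * p.2)).sum + f k * c := by
  intro l
  induction l with
  | nil =>
    intro k _
    simp [PySem.Dict.insert, PySem.Dict.contains, PySem.Dict.getD, PySem.Dict.get?]
  | cons a t ih =>
    intro k hnd
    by_cases hk : a.1 = k
    · subst hk
      have htk : ∀ p ∈ t, ¬ (p.1 = a.1) := by
        intro p hp he
        simp only [List.map_cons, List.nodup_cons] at hnd
        exact hnd.1 (by rw [← he]; exact List.mem_map_of_mem hp)
      have hmap : t.map (fun p => if (p.1 == a.1) = true then (a.1, (a.2 + c)) else p)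
          = t.map id :=
        List.map_congr_left (fun p hp => by simp [htk p hp])
      simp only [PySem.Dict.insert, PySem.Dict.contains, PySem.Dict.getD, PySem.Dict.get?,
        List.any_cons, beq_self_eq_true, Bool.true_or, if_true, List.find?_cons_of_pos,
        Option.map_some, Option.getD_some, List.map_cons, hmap, List.map_id, List.sum_cons]
      ring
    · have hbeq : (a.1 == k) = false := by simp [hk]
      have hgd : (PySem.Dict.mk (a :: t)).getD k 0 = (PySem.Dict.mk t).getD k 0 := by
        simp [PySem.Dict.getD, PySem.Dict.get?, List.find?_cons_of_neg, hbeq]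
      rw [hgd]
      have hnd' : (t.map Prod.fst).Nodup := by
        simp only [List.map_cons, List.nodup_cons] at hnd; exact hnd.2
      have hitems : ((PySem.Dict.mk (a :: t)).insert k ((PySem.Dict.mk t).getD k 0 + c)).items
          = a :: ((PySem.Dict.mk t).insert k ((PySem.Dict.mk t).getD k 0 + c)).items := by
        simp only [PySem.Dict.insert, PySem.Dict.contains, List.any_cons, hbeq, Bool.false_or]
        by_cases hct : (t.any fun p => p.1 == k) = true
        · simp [hct, hbeq]
        · simp only [Bool.not_eq_true] at hct
          simp [hct]
      rw [hitems]
      simp only [List.map_cons, List.sum_cons, ih k hnd']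
      ring

theorem pv_Wp_insert_bump (r : Nat) (d : PySem.Dict (Char × Char) Int) (k : Char × Char)
    (c : Int) (hnd : d.keys.Nodup) :
    pvWp r (d.insert k (d.getD k 0 + c)) = pvWp r d + pvPairCost r k.1 k.2 * c := by
  obtain ⟨l⟩ := d
  exact pv_sum_insert_bump (fun q => pvPairCost r q.1 q.2) c l k hnd

-- the pair-adding fold: weighted sum and key distinctness
theorem pv_addPairs_fold (r : Nat) (c : Int) : ∀ (s : List Char)
    (d : PySem.Dict (Char × Char) Int) (q : Char), d.keys.Nodup →
    pvWp r ((s.foldl (fun st ch => (st.1.insert (st.2, ch) (st.1.getD (st.2, ch) 0 + c), ch))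
          (d, q)).1)
        = pvWp r d + ((( q :: s).zip s).map (fun t => pvPairCost r t.1 t.2)).sum * c
      ∧ ((s.foldl (fun st ch => (st.1.insert (st.2, ch) (st.1.getD (st.2, ch) 0 + c), ch))
          (d, q)).1).keys.Nodup := by
  intro s
  induction s with
  | nil => intro d q hd; exact ⟨by simp, hd⟩
  | cons ch t ih =>
    intro d q hd
    simp only [List.foldl_cons, List.zip_cons_cons, List.map_cons, List.sum_cons]
    obtain ⟨h1, h2⟩ := ih (d.insert (q, ch) (d.getD (q, ch) 0 + c)) ch
      (PySem.Dict.nodup_keys_insert d _ _ hd)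
    refine ⟨?_, h2⟩
    rw [h1, pv_Wp_insert_bump r d (q, ch) c hd]
    ring

theorem pv_addPairs_sum (r : Nat) (d : PySem.Dict (Char × Char) Int) (s : List Char) (c : Int)
    (hd : d.keys.Nodup) :
    pvWp r (pvAddPairs d s c)
      = pvWp r d + ((('A' :: s).zip s).map (fun t => pvPairCost r t.1 t.2)).sum * c :=
  (pv_addPairs_fold r c s d 'A' hd).1

theorem pv_addPairs_nodup (d : PySem.Dict (Char × Char) Int) (s : List Char) (c : Int)
    (hd : d.keys.Nodup) : (pvAddPairs d s c).keys.Nodup :=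
  (pv_addPairs_fold 0 c s d 'A' hd).2

-- one level of B's sweep shifts the cost level by one
theorem pv_stepB_aux (r : Nat) : ∀ (L : List ((Char × Char) × Int))
    (acc : PySem.Dict (Char × Char) Int), acc.keys.Nodup →
    pvWp r (L.foldl (fun new q => pvAddPairs new (pvMove q.1.1 q.1.2) q.2) acc)
        = pvWp r acc + (L.map (fun q => pvPairCost (r + 1) q.1.1 q.1.2 * q.2)).sum
      ∧ (L.foldl (fun new q => pvAddPairs new (pvMove q.1.1 q.1.2) q.2) acc).keys.Nodup := by
  intro L
  induction L with
  | nil => intro acc hacc; simpa using hacc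
  | cons q t ih =>
    intro acc hacc
    simp only [List.foldl_cons, List.map_cons, List.sum_cons]
    obtain ⟨ihs, ihn⟩ := ih (pvAddPairs acc (pvMove q.1.1 q.1.2) q.2)
      (pv_addPairs_nodup acc _ _ hacc)
    refine ⟨?_, ihn⟩
    rw [ihs, pv_addPairs_sum r acc (pvMove q.1.1 q.1.2) q.2 hacc]
    have : pvPairCost (r + 1) q.1.1 q.1.2
        = ((('A' :: pvMove q.1.1 q.1.2).zip (pvMove q.1.1 q.1.2)).map
            (fun t => pvPairCost r t.1 t.2)).sum := rfl
    rw [this]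
    ring

theorem pv_stepB_sum (r : Nat) (d : PySem.Dict (Char × Char) Int) :
    pvWp r (pvStepB d) = pvWp (r + 1) d := by
  have h := (pv_stepB_aux r d.items PySem.Dict.empty (by simp [PySem.Dict.empty, PySem.Dict.keys])).1
  unfold pvStepB
  rw [h]
  simp [pvWp, PySem.Dict.empty]

theorem pv_stepB_nodup (d : PySem.Dict (Char × Char) Int) : (pvStepB d).keys.Nodup :=
  (pv_stepB_aux 0 d.items PySem.Dict.empty (by simp [PySem.Dict.empty, PySem.Dict.keys])).2

-- the level loop ignores the loop variable: it is an iterate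
theorem pv_foldl_const_iterate (L : List Int) (d : PySem.Dict (Char × Char) Int) :
    L.foldl (fun c _ => pvStepB c) d = pvStepB^[L.length] d := by
  induction L generalizing d with
  | nil => rfl
  | cons x t ih => simp [List.foldl_cons, ih, Function.iterate_succ_apply]

theorem pv_Wp_iterate : ∀ (m : Nat) (d : PySem.Dict (Char × Char) Int), d.keys.Nodup →
    pvWp 0 (pvStepB^[m] d) = pvWp m d := by
  intro m
  induction m with
  | zero => intro d _; rfl
  | succ k ih =>
    intro d hd
    rw [Function.iterate_succ_apply, ih _ (pv_stepB_nodup d), pv_stepB_sum k d]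

-- ===== VERDICT (by name: the statement is the Claim_ definition above) =====
theorem num_moves_spec : Claim_equal_num_moves := by
  intro code repeats _ hpre
  unfold Spec_num_moves num_moves num_moves_alt
  by_cases hnn : 0 ≤ repeats
  case neg =>
    have hcode : code = "" := by
      rcases hpre with h | ⟨h0, _⟩
      · exact h
      · exact absurd h0 hnn
    subst hcode
    have ht : repeats.toNat = 0 := Int.toNat_of_nonpos (by omega)
    have hr : PySem.List.pyRange 0 repeats = [] := by
      simp [PySem.List.pyRange]; omega
    rw [ht, hr]
    rw [(pvNumA_correct 0 "".toList PySem.Dict.empty pvInv_empty).1]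
    simp [pvNumMovesA, pvAddPairs, PySem.Dict.empty, PySem.Dict.values]
  case pos =>
    obtain ⟨m, rfl⟩ := Int.eq_ofNat_of_zero_le hnn
    have hsum : pvNumMovesA code.toList m
        = ((('A' :: code.toList).zip code.toList).map (fun q => pvPairCost m q.1 q.2)).sum := by
      cases m with
      | zero => exact pv_bridge_zero code.toList
      | succ k =>
        apply pv_bridgeA
        rcases hpre with h | ⟨_, h0 | hall⟩
        · intro c hc
          rw [h] at hc
          simp at hc
        · exfalso
          omega
        · intro c hc
          have := List.all_eq_true.mp hall c hc
          simpa [pvKeys] using this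
    have hA : (pvNumA code.toList ((m : Int)).toNat PySem.Dict.empty).1
        = pvNumMovesA code.toList m := by
      rw [Int.toNat_natCast]
      exact (pvNumA_correct m code.toList PySem.Dict.empty pvInv_empty).1
    rw [hA, hsum]
    have hrange : PySem.List.pyRange 0 (m : Int) = (List.range m).map (fun k : Nat => (k : Int)) :=
      PySem.List.pyRange_zero_natCast m
    simp only [hrange, pv_foldl_const_iterate]
    simp only [List.length_map, List.length_range]
    have hnd0 : (PySem.Dict.empty : PySem.Dict (Char × Char) Int).keys.Nodup := by
      simp [PySem.Dict.empty, PySem.Dict.keys]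
    have hW0 : ∀ d : PySem.Dict (Char × Char) Int, d.values.sum = pvWp 0 d := by
      intro d
      simp [pvWp, PySem.Dict.values, pvPairCost]
    rw [hW0, pv_Wp_iterate m _ (pv_addPairs_nodup _ _ _ hnd0),
      pv_addPairs_sum m PySem.Dict.empty code.toList 1 hnd0]
    have hWe : pvWp m PySem.Dict.empty = 0 := by
      simp [pvWp, PySem.Dict.empty]
    rw [hWe]
    ring
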